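-- pv_equiv track=rewrite | github.com/Ravikumarchavva/cascadia-vlm-challenge | cluade-game copy.py | score_hawks
-- ===== SOURCE A (Python) =====
-- from typing import List, Dict, Tuple, Optional
--
-- def _find_connected_components(
--     tile_indices: List[int],
--     adjacency: Dict[int, List[int]],
-- ) -> List[List[int]]:
--     """
--     Given a subset of tile indices and the full adjacency graph,
--     return connected components (groups of mutually-reachable tiles).
--     """
--     remaining = set(tile_indices)
--     components = []
--     while remaining:
--         start = next(iter(remaining))
--         # BFS
--         queue = [start]
--         visited = {start}
--         while queue:
--             node = queue.pop(0)
--             for nb in adjacency.get(node, []):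
--                 if nb in remaining and nb not in visited:
--                     visited.add(nb)
--                     queue.append(nb)
--         components.append(sorted(visited))
--         remaining -= visited
--     return components
--
-- def score_hawks(
--     animals: List[str],
--     adjacency: Dict[int, List[int]],
-- ) -> int:
--     """
--     Red-Tailed Hawk: scores based on connected chain length.
--
--     Scoring table (from card):
--       chain_size → total_points_for_chain
--       2 → 5
--       3 → 9
--       4 → 12
--       5 → 16
--       6 → 20
--       7 → 24
--       8+ → 23
--
--     Isolated hawks (chain size 1) score nothing.
--     """
--     HAWK_CHAIN_SCORES = {
--         2: 5,
--         3: 9,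
--         4: 12,
--         5: 16,
--         6: 20,
--         7: 24,
--     }
--
--     hawk_indices = [i for i, a in enumerate(animals) if a == "hawk"]
--     if not hawk_indices:
--         return 0
--
--     components = _find_connected_components(hawk_indices, adjacency)
--     score = 0
--     for comp in components:
--         size = len(comp)
--         if size < 2:
--             continue  # isolated hawks don't score
--         if size >= 8:
--             score += 23
--         else:
--             score += HAWK_CHAIN_SCORES.get(size, 0)
--     return score
-- ===== SOURCE B (Python) =====
-- def score_hawks(animals, adjacency):
--     """
--     Red-Tailed Hawk scoring via union-find with eager relabelling: every hawk
--     cell starts as its own component label; each hawk-to-hawk edge merges the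
--     two labels (no BFS/DFS traversal, no queue, no component lists); the score
--     is read off a counter of the final labels.
--     """
--     n = len(animals)
--     label = [i if a == "hawk" else None for i, a in enumerate(animals)]
--     for u in range(n):
--         if label[u] is None:
--             continue
--         for v in adjacency.get(u, []):
--             if 0 <= v < n and label[v] is not None and label[v] != label[u]:
--                 lu, lv = label[u], label[v]
--                 label = [lu if x == lv else x for x in label]
--     sizes = {}
--     for x in label:
--         if x is not None:
--             sizes[x] = sizes.get(x, 0) + 1
--     total = 0
--     for s in sizes.values():
--         total += 23 if s >= 8 else (0, 0, 5, 9, 12, 16, 20, 24)[s] if s >= 2 else 0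
--     return total
-- ===== Notes on version B (the rewrite author's own statement) =====
-- stated objective: alternative
-- what changed: Union-find with eager relabelling replaces A's BFS entirely: no traversal, no queue, no remaining-set peel, no component lists or sorting - each hawk starts as its own label, every hawk-to-hawk edge merges two labels by a whole-array relabel, and the score is read off a counter of the final labels. Pre_ excludes inputs whose hawk subgraph has a one-directional edge, where A's returned score is an accidental artefact of CPython's set-iteration order.
-- outside the precondition, e.g. on score_hawks(['hawk', 'hawk', 'bear'], {1: [0]}): A returns 0, B returns 5
import Mathlib
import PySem

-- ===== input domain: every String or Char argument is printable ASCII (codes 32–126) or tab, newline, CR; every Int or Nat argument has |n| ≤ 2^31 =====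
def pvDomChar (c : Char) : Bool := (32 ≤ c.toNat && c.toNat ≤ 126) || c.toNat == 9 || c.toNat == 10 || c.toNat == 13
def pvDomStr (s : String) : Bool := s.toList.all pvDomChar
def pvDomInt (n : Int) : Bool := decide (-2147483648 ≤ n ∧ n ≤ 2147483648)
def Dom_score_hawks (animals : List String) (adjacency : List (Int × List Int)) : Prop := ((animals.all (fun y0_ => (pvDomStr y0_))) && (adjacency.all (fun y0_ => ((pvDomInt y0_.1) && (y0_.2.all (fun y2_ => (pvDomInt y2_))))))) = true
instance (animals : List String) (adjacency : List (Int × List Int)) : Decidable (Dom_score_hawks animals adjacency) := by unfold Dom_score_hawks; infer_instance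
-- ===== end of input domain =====

-- B replaces A's BFS component peel (queue with pop(0), remaining-set difference, sort) by
-- union-find with eager relabelling: labels merged per hawk-to-hawk edge, score read off a
-- counter of the final labels; return value only, no mutation.

-- ===== PORT A =====
-- A's HAWK_CHAIN_SCORES literal
def pvHawkTable : PySem.Dict Int Int :=
  PySem.Dict.ofList [(2, 5), (3, 9), (4, 12), (5, 16), (6, 20), (7, 24)]

-- inner BFS of _find_connected_components: 'while queue: node = queue.pop(0); …'
-- fuel is a termination device only: the caller passes len(animals)+1, which always exceeds the
-- number of pops (each queue entry is a distinct board index put into visited).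
def pvA_bfs (adjGet : Int → List Int) (remaining : PySem.Set Int) :
    Nat → List Int → PySem.Set Int → PySem.Set Int
  | 0, _, visited => visited
  | _ + 1, [], visited => visited
  | fuel + 1, node :: queue, visited =>
      let st := (adjGet node).foldl
        (fun (st : PySem.Set Int × List Int) nb =>
          if PySem.Set.contains remaining nb && !(PySem.Set.contains st.1 nb) then
            (PySem.Set.add st.1 nb, st.2 ++ [nb])
          else st)
        (visited, queue)
      pvA_bfs adjGet remaining fuel st.2 st.1

-- outer loop of _find_connected_components: 'while remaining: start = next(iter(remaining)); …'.
-- start is taken as the first element of the insertion-ordered Set; CPython's set-iteration order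
-- is not modelled, but under Pre_ (symmetric hawk subgraph) the returned score does not depend on
-- which element of remaining is picked, so the port is exact there.  fuel as in pvA_bfs.
def pvA_components (adjGet : Int → List Int) (innerFuel : Nat) :
    Nat → PySem.Set Int → List (List Int) → List (List Int)
  | 0, _, comps => comps
  | fuel + 1, remaining, comps =>
      match remaining with
      | [] => comps
      | start :: _ =>
          let visited := pvA_bfs adjGet remaining innerFuel [start] (PySem.Set.ofList [start])
          pvA_components adjGet innerFuel fuel (PySem.Set.diff remaining visited)
            (comps ++ [PySem.List.sorted visited (fun x => x)])

def score_hawks (animals : List String) (adjacency : List (Int × List Int)) : Int :=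
  let hawk_indices :=
    ((PySem.List.enumerate animals).filter (fun p => p.2 == "hawk")).map (fun p => p.1)
  if hawk_indices.isEmpty then 0
  else
    let adjGet := fun node => PySem.Dict.getD (PySem.Dict.ofList adjacency) node []
    let components :=
      pvA_components adjGet (animals.length + 1) (animals.length + 1)
        (PySem.Set.ofList hawk_indices) []
    components.foldl
      (fun score comp =>
        let size : Int := (comp.length : Int)
        if size < 2 then score
        else if 8 ≤ size then score + 23
        else score + PySem.Dict.getD pvHawkTable size 0)
      0

-- ===== PORT B =====
-- B's merge loop: 'for u in range(n): … for v in adjacency.get(u, []): if 0 <= v < n and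
-- label[v] is not None and label[v] != label[u]: relabel'.  label[v] is read behind the bounds
-- check, so the '.getD none' default is never the value Python would not compute.
def pvB_labels (animals : List String) (adjacency : List (Int × List Int)) : List (Option Int) :=
  (PySem.List.pyRange 0 (animals.length : Int) 1).foldl
    (fun lbl u =>
      if ((PySem.List.pyGet? lbl u).getD none) = none then lbl
      else
        (PySem.Dict.getD (PySem.Dict.ofList adjacency) u []).foldl
          (fun lbl v =>
            if decide (0 ≤ v) && decide (v < (animals.length : Int)) &&
                ((PySem.List.pyGet? lbl v).getD none).isSome &&
                (((PySem.List.pyGet? lbl v).getD none) != ((PySem.List.pyGet? lbl u).getD none)) then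
              lbl.map (fun x => if x == (PySem.List.pyGet? lbl v).getD none
                                then (PySem.List.pyGet? lbl u).getD none else x)
            else lbl) lbl)
    ((PySem.List.enumerate animals).map (fun p => if p.2 == "hawk" then some p.1 else none))

-- B's 'sizes[x] = sizes.get(x, 0) + 1' counter and the final sum over sizes.values().
def score_hawks_alt (animals : List String) (adjacency : List (Int × List Int)) : Int :=
  let label := pvB_labels animals adjacency
  let sizes := label.foldl
    (fun (d : PySem.Dict Int Int) x =>
      match x with
      | none => d
      | some k => d.insert k (d.getD k 0 + 1)) PySem.Dict.empty
  (PySem.Dict.values sizes).foldl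
    (fun total s =>
      total + (if 8 ≤ s then 23
               else if 2 ≤ s then (PySem.List.pyGet? ([0, 0, 5, 9, 12, 16, 20, 24] : List Int) s).getD 0
               else 0)) 0

-- ===== PRECONDITION & SPEC =====
-- Python A draws each BFS start from next(iter(<set>)), an order CPython leaves unspecified (hash
-- order); when every hawk-to-hawk edge is mutual the component partition — hence the score — does
-- not depend on that order.  Pre_ therefore excludes inputs whose hawk subgraph has a
-- one-directional edge, where A's returned score is an accidental artefact of set-iteration order.
def Pre_score_hawks (animals : List String) (adjacency : List (Int × List Int)) : Prop :=
  ∀ p ∈ PySem.List.enumerate animals, p.2 = "hawk" →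
    ∀ q ∈ PySem.List.enumerate animals, q.2 = "hawk" →
      q.1 ∈ PySem.Dict.getD (PySem.Dict.ofList adjacency) p.1 [] →
      p.1 ∈ PySem.Dict.getD (PySem.Dict.ofList adjacency) q.1 []
instance (animals : List String) (adjacency : List (Int × List Int)) :
    Decidable (Pre_score_hawks animals adjacency) := by unfold Pre_score_hawks; infer_instance

def pvWitness_score_hawks : List String × (List (Int × List Int)) :=
  (["hawk", "hawk"], [(0, [1]), (1, [0])])

def Spec_score_hawks (animals : List String) (adjacency : List (Int × List Int)) (out : Int) :
    Prop := out = score_hawks_alt animals adjacency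
instance (animals : List String) (adjacency : List (Int × List Int)) (out : Int) :
    Decidable (Spec_score_hawks animals adjacency out) := by unfold Spec_score_hawks; infer_instance

-- ===== CLAIM (what is proved, stated in full; the proofs are below) =====
def Claim_equal_score_hawks : Prop := ∀ (animals : List String) (adjacency : List (Int × List Int)), Dom_score_hawks animals adjacency → Pre_score_hawks animals adjacency → Spec_score_hawks animals adjacency (score_hawks animals adjacency)

-- ===== LEMMAS AND PROOFS =====

def pvAdj (adjacency : List (Int × List Int)) : Int → List Int :=
  fun node => PySem.Dict.getD (PySem.Dict.ofList adjacency) node []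

def pvHawks (animals : List String) : List Int :=
  ((PySem.List.enumerate animals).filter (fun p => p.2 == "hawk")).map (fun p => p.1)

theorem pvHawks_mem (animals : List String) (x : Int) :
    x ∈ pvHawks animals ↔ ∃ (k : Nat) (h : k < animals.length), x = (k : Int) ∧ animals[k] = "hawk" := by
  unfold pvHawks
  simp only [List.mem_map, List.mem_filter, PySem.List.mem_enumerate_iff]
  constructor
  · rintro ⟨p, ⟨⟨k, hk, rfl⟩, hh⟩, rfl⟩
    exact ⟨k, hk, by simp, by simpa using hh⟩
  · rintro ⟨k, hk, rfl, hh⟩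
    exact ⟨((k : Int), animals[k]), ⟨⟨k, hk, by simp⟩, by simpa using hh⟩, rfl⟩

theorem pvHawks_pairwise (animals : List String) : (pvHawks animals).Pairwise (· < ·) := by
  unfold pvHawks
  refine List.Pairwise.map _ (fun a b h => h) ?_
  exact (PySem.List.pairwise_lt_enumerate animals 0).filter _

theorem pvHawks_nodup (animals : List String) : (pvHawks animals).Nodup := by
  exact (pvHawks_pairwise animals).imp (fun h => ne_of_lt h)

theorem pvHawks_len_le (animals : List String) : (pvHawks animals).length ≤ animals.length := by
  unfold pvHawks
  calc _ = (((PySem.List.enumerate animals).filter (fun p => p.2 == "hawk"))).length := by simp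
    _ ≤ (PySem.List.enumerate animals).length := List.length_filter_le _ _
    _ = animals.length := by simp [PySem.List.length_enumerate]

-- the hawk-to-hawk edge relation and its reflexive-transitive closure (connectivity)
def pvEd (animals : List String) (adjacency : List (Int × List Int)) (a b : Int) : Prop :=
  a ∈ pvHawks animals ∧ b ∈ pvHawks animals ∧ b ∈ pvAdj adjacency a

def pvConn (animals : List String) (adjacency : List (Int × List Int)) : Int → Int → Prop :=
  Relation.ReflTransGen (pvEd animals adjacency)

theorem pvEd_symm (animals : List String) (adjacency : List (Int × List Int))
    (hpre : Pre_score_hawks animals adjacency) :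
    ∀ a b, pvEd animals adjacency a b → pvEd animals adjacency b a := by
  rintro a b ⟨ha, hb, hadj⟩
  refine ⟨hb, ha, ?_⟩
  obtain ⟨k, hk, rfl, hhk⟩ := (pvHawks_mem animals a).mp ha
  obtain ⟨m, hm, rfl, hhm⟩ := (pvHawks_mem animals b).mp hb
  exact hpre ((k : Int), animals[k])
    (by rw [PySem.List.mem_enumerate_iff]; exact ⟨k, hk, by simp⟩) hhk
    ((m : Int), animals[m])
    (by rw [PySem.List.mem_enumerate_iff]; exact ⟨m, hm, by simp⟩) hhm hadj

theorem pvConn_symm (animals : List String) (adjacency : List (Int × List Int))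
    (hpre : Pre_score_hawks animals adjacency) :
    ∀ a b, pvConn animals adjacency a b → pvConn animals adjacency b a := by
  intro a b h
  exact (Relation.ReflTransGen.symmetric (fun {x y} hxy => pvEd_symm animals adjacency hpre x y hxy)) h

-- BFS-relative step relation on a remaining set R
def pvEdR (adjGet : Int → List Int) (R : List Int) (a b : Int) : Prop :=
  b ∈ adjGet a ∧ b ∈ R

-- a set R of hawks closed under connectivity
def pvClosed (animals : List String) (adjacency : List (Int × List Int)) (R : List Int) : Prop :=
  ∀ x ∈ R, ∀ y ∈ pvHawks animals, pvConn animals adjacency x y → y ∈ R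

theorem pvReach_iff (animals : List String) (adjacency : List (Int × List Int))
    (R : List Int) (hRH : ∀ x ∈ R, x ∈ pvHawks animals)
    (hcl : pvClosed animals adjacency R) (s : Int) (hs : s ∈ R) (x : Int) :
    Relation.ReflTransGen (pvEdR (pvAdj adjacency) R) s x ↔
      pvConn animals adjacency s x ∧ x ∈ R := by
  constructor
  · intro h
    induction h with
    | refl => exact ⟨Relation.ReflTransGen.refl, hs⟩
    | tail hsb hbc ih =>
      obtain ⟨hconn, hbR⟩ := ih
      exact ⟨hconn.tail ⟨hRH _ hbR, hRH _ hbc.2, hbc.1⟩, hbc.2⟩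
  · rintro ⟨hconn, hxR⟩
    revert hxR
    induction hconn with
    | refl => intro _; exact Relation.ReflTransGen.refl
    | @tail b c hsb hbc ih =>
      intro hcR
      have hbR : b ∈ R := hcl s hs b hbc.1 hsb
      exact (ih hbR).tail ⟨hbc.2.2, hcR⟩

-- characterization of the inner fold of pvA_bfs
theorem pvBfsFold (R : List Int) (ns : List Int)
    (V Q : List Int) (hV : V.Nodup) :
    ∃ news : List Int,
      (ns.foldl
        (fun (st : PySem.Set Int × List Int) nb =>
          if PySem.Set.contains R nb && !(PySem.Set.contains st.1 nb) then
            (PySem.Set.add st.1 nb, st.2 ++ [nb])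
          else st) (V, Q)) = (V ++ news, Q ++ news)
      ∧ (V ++ news).Nodup
      ∧ (∀ y, y ∈ news ↔ (y ∈ ns ∧ y ∈ R ∧ y ∉ V)) := by
  induction ns generalizing V Q with
  | nil => exact ⟨[], by simp, by simpa using hV, by simp⟩
  | cons nb t ih =>
    simp only [List.foldl_cons]
    by_cases hc : nb ∈ R ∧ nb ∉ V
    · have hcond : (PySem.Set.contains R nb && !(PySem.Set.contains V nb)) = true := by
        simp only [PySem.Set.contains_eq_listContains, List.contains_eq_mem, Bool.and_eq_true,
          decide_eq_true_eq, Bool.not_eq_true', decide_eq_false_iff_not]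
        exact hc
      rw [if_pos hcond]
      have hVnb : (V ++ [nb]).Nodup := by
        simp only [List.nodup_append, List.nodup_cons, List.not_mem_nil, not_false_iff,
          List.nodup_nil, and_true, true_and]
        refine ⟨hV, fun a ha b hb => ?_⟩
        rw [List.mem_singleton] at hb
        subst hb
        rintro rfl
        exact hc.2 ha
      obtain ⟨news, heq, hnd, hmem⟩ := ih (V ++ [nb]) (Q ++ [nb]) hVnb
      refine ⟨nb :: news, ?_, ?_, ?_⟩
      · rw [PySem.Set.add_of_not_mem hc.2, heq]
        simp
      · have : V ++ nb :: news = (V ++ [nb]) ++ news := by simp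
        rw [this]; exact hnd
      · intro y
        rw [List.mem_cons, hmem y]
        by_cases hy : y = nb
        · subst hy
          simp [hc.1, hc.2]
        · simp only [List.mem_append, List.mem_cons]
          constructor
          · rintro (rfl | ⟨h1, h2, h3⟩)
            · exact absurd rfl hy
            · exact ⟨Or.inr h1, h2, fun hV' => h3 (Or.inl hV')⟩
          · rintro ⟨h1 | h1, h2, h3⟩
            · exact absurd h1 hy
            · refine Or.inr ⟨h1, h2, fun h => ?_⟩
              rcases h with h | h
              · exact h3 h
              · rcases h with h | h
                · exact hy h
                · exact List.not_mem_nil h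
    · have hcond : (PySem.Set.contains R nb && !(PySem.Set.contains V nb)) = false := by
        simp only [PySem.Set.contains_eq_listContains, List.contains_eq_mem]
        rcases not_and_or.mp hc with h | h
        · simp [h]
        · simp [not_not.mp h]
      rw [hcond]
      simp only [Bool.false_eq_true, if_false]
      obtain ⟨news, heq, hnd, hmem⟩ := ih V Q hV
      refine ⟨news, heq, hnd, ?_⟩
      intro y
      rw [hmem y, List.mem_cons]
      constructor
      · rintro ⟨h1, h2, h3⟩; exact ⟨Or.inr h1, h2, h3⟩
      · rintro ⟨h1 | h1, h2, h3⟩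
        · subst h1; exact absurd ⟨h2, h3⟩ hc
        · exact ⟨h1, h2, h3⟩

theorem pvCountSplit (M : List Int) (p : Int → Bool) :
    (M.countP p) + M.countP (fun x => !p x) = M.length := by
  induction M with
  | nil => rfl
  | cons x t ih => by_cases h : p x = true <;> simp [h] <;> omega

theorem pvRemoveOne (M : List Int) (a : Int) (h : M.Nodup) (ha : a ∈ M) :
    (M.filter (fun x => !(x == a))).length + 1 = M.length := by
  have h2 : M.count a = 1 := List.count_eq_one_of_mem h ha
  have h3 := pvCountSplit M (fun x => x == a)
  rw [← List.countP_eq_length_filter]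
  unfold List.count at h2
  omega

theorem pvFilterDrop (R : List Int) (hR : R.Nodup) :
    ∀ (news V : List Int), news.Nodup → (∀ y ∈ news, y ∈ R ∧ y ∉ V) →
    (R.filter (fun r => !(decide (r ∈ V ++ news)))).length + news.length
      = (R.filter (fun r => !(decide (r ∈ V)))).length := by
  intro news
  induction news with
  | nil => intro V _ _; simp
  | cons a t ih =>
    intro V hnd hsub
    have hstep : V ++ a :: t = (V ++ [a]) ++ t := by simp
    rw [hstep]
    have hsub' : ∀ y ∈ t, y ∈ R ∧ y ∉ V ++ [a] := by
      intro y hy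
      obtain ⟨h1, h2⟩ := hsub y (List.mem_cons_of_mem _ hy)
      refine ⟨h1, ?_⟩
      simp only [List.mem_append, List.mem_singleton]
      rintro (h | rfl)
      · exact h2 h
      · exact (List.nodup_cons.mp hnd).1 hy
    have hlen : (a :: t).length = t.length + 1 := rfl
    rw [hlen, ← Nat.add_assoc, ih (V ++ [a]) (List.nodup_cons.mp hnd).2 hsub']
    have hfe : R.filter (fun r => !(decide (r ∈ V ++ [a])))
        = (R.filter (fun r => !(decide (r ∈ V)))).filter (fun x => !(x == a)) := by
      rw [List.filter_filter]
      apply List.filter_congr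
      intro x _
      apply Bool.eq_iff_iff.mpr
      simp only [Bool.not_eq_true', decide_eq_false_iff_not, List.mem_append,
        List.mem_singleton, Bool.and_eq_true, beq_eq_false_iff_ne, ne_eq]
      tauto
    have ha : a ∈ R.filter (fun r => !(decide (r ∈ V))) := by
      obtain ⟨h1, h2⟩ := hsub a List.mem_cons_self
      simp [List.mem_filter, h1, h2]
    have := pvRemoveOne (R.filter (fun r => !(decide (r ∈ V)))) a (hR.filter _) ha
    rw [hfe]
    omega

-- main BFS invariant lemma
theorem pvBfs_main (adjGet : Int → List Int) (R : List Int) (hRnd : R.Nodup) :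
    ∀ (fuel : Nat) (Q V : List Int),
      V.Nodup → Q.Nodup → (∀ q ∈ Q, q ∈ V) →
      (∀ x ∈ V, x ∉ Q → ∀ y, y ∈ adjGet x → y ∈ R → y ∈ V) →
      Q.length + (R.filter (fun r => !(decide (r ∈ V)))).length < fuel →
      (pvA_bfs adjGet R fuel Q V).Nodup
      ∧ (∀ v ∈ V, v ∈ pvA_bfs adjGet R fuel Q V)
      ∧ (∀ x ∈ pvA_bfs adjGet R fuel Q V,
          x ∈ V ∨ ∃ q ∈ Q, Relation.ReflTransGen (pvEdR adjGet R) q x)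
      ∧ (∀ x ∈ pvA_bfs adjGet R fuel Q V, ∀ y, y ∈ adjGet x → y ∈ R →
          y ∈ pvA_bfs adjGet R fuel Q V) := by
  intro fuel
  induction fuel with
  | zero => intro Q V _ _ _ _ hfuel; omega
  | succ f ih =>
    intro Q V hV hQ hQV hFront hfuel
    cases Q with
    | nil =>
      simp only [pvA_bfs]
      exact ⟨hV, fun v hv => hv, fun x hx => Or.inl hx,
        fun x hx y hy hyR => hFront x hx List.not_mem_nil y hy hyR⟩
    | cons q Q' =>
      simp only [pvA_bfs]
      obtain ⟨news, heq, hnd1, hmem⟩ := pvBfsFold R (adjGet q) V Q' hV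
      rw [heq]
      dsimp only
      have hnewsnd : news.Nodup := (List.nodup_append.mp hnd1).2.1
      have hdisj : ∀ y ∈ news, y ∉ V := fun y hy => ((hmem y).mp hy).2.2
      have hQ'1 : Q'.Nodup := (List.nodup_cons.mp hQ).2
      have hQ1 : (Q' ++ news).Nodup := by
        rw [List.nodup_append]
        refine ⟨hQ'1, hnewsnd, fun a ha b hb => ?_⟩
        rintro rfl
        exact hdisj a hb (hQV a (List.mem_cons_of_mem _ ha))
      have hQV1 : ∀ p ∈ Q' ++ news, p ∈ V ++ news := by
        intro p hp
        rcases List.mem_append.mp hp with h | h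
        · exact List.mem_append.mpr (Or.inl (hQV p (List.mem_cons_of_mem _ h)))
        · exact List.mem_append.mpr (Or.inr h)
      have hFront1 : ∀ x ∈ V ++ news, x ∉ Q' ++ news →
          ∀ y, y ∈ adjGet x → y ∈ R → y ∈ V ++ news := by
        intro x hx hxn y hy hyR
        rcases List.mem_append.mp hx with hxV | hxnews
        · by_cases hxq : x = q
          · subst hxq
            by_cases hyV : y ∈ V
            · exact List.mem_append.mpr (Or.inl hyV)
            · exact List.mem_append.mpr (Or.inr ((hmem y).mpr ⟨hy, hyR, hyV⟩))
          · have hxQ : x ∉ q :: Q' := by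
              intro h
              rcases List.mem_cons.mp h with h | h
              · exact hxq h
              · exact hxn (List.mem_append.mpr (Or.inl h))
            exact List.mem_append.mpr (Or.inl (hFront x hxV hxQ y hy hyR))
        · exact absurd (List.mem_append.mpr (Or.inr hxnews)) hxn
      have hfuel1 : (Q' ++ news).length
          + (R.filter (fun r => !(decide (r ∈ V ++ news)))).length < f := by
        have hdrop := pvFilterDrop R hRnd news V hnewsnd
          (fun y hy => ⟨((hmem y).mp hy).2.1, ((hmem y).mp hy).2.2⟩)
        have hlq : (q :: Q').length = Q'.length + 1 := rfl
        rw [List.length_append]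
        rw [hlq] at hfuel
        omega
      obtain ⟨ind, imono, isound, iclosed⟩ := ih (Q' ++ news) (V ++ news) hnd1 hQ1 hQV1 hFront1 hfuel1
      refine ⟨ind, ?_, ?_, iclosed⟩
      · intro v hv
        exact imono v (List.mem_append.mpr (Or.inl hv))
      · intro x hx
        rcases isound x hx with h | ⟨q1, hq1, hrtg⟩
        · rcases List.mem_append.mp h with h | h
          · exact Or.inl h
          · exact Or.inr ⟨q, List.mem_cons_self,
              Relation.ReflTransGen.single ⟨((hmem x).mp h).1, ((hmem x).mp h).2.1⟩⟩
        · rcases List.mem_append.mp hq1 with h | h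
          · exact Or.inr ⟨q1, List.mem_cons_of_mem _ h, hrtg⟩
          · exact Or.inr ⟨q, List.mem_cons_self,
              (Relation.ReflTransGen.single
                ⟨((hmem q1).mp h).1, ((hmem q1).mp h).2.1⟩).trans hrtg⟩

-- clean characterization of one BFS call as made by the loop
theorem pvBfs_char (adjGet : Int → List Int) (R : List Int) (hRnd : R.Nodup)
    (s : Int) (hs : s ∈ R) (fuel : Nat) (hfuel : R.length < fuel) :
    (pvA_bfs adjGet R fuel [s] (PySem.Set.ofList [s])).Nodup
    ∧ (∀ x, x ∈ pvA_bfs adjGet R fuel [s] (PySem.Set.ofList [s]) ↔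
        Relation.ReflTransGen (pvEdR adjGet R) s x) := by
  have hofl : PySem.Set.ofList [s] = [s] :=
    PySem.Set.ofList_eq_self_of_nodup _ (List.nodup_singleton s)
  rw [hofl]
  have hone : ∀ y ∈ ([s] : List Int), y ∈ R ∧ y ∉ ([] : List Int) := by
    intro y hy
    rw [List.mem_singleton] at hy
    subst hy
    exact ⟨hs, List.not_mem_nil⟩
  have hdrop := pvFilterDrop R hRnd [s] [] (List.nodup_singleton s) hone
  have hnil : (R.filter (fun r => !(decide (r ∈ ([] : List Int))))).length = R.length := by
    simp
  have hfl : ([s] : List Int).length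
      + (R.filter (fun r => !(decide (r ∈ ([] : List Int) ++ [s])))).length < fuel := by
    simp only [List.nil_append, List.length_singleton] at hdrop ⊢
    omega
  obtain ⟨nd, mono, sound, closed⟩ := pvBfs_main adjGet R hRnd fuel [s] [s]
    (List.nodup_singleton s) (List.nodup_singleton s) (fun q hq => hq)
    (fun x hx hnx => absurd hx hnx) hfl
  refine ⟨nd, fun x => ⟨?_, ?_⟩⟩
  · intro hx
    rcases sound x hx with h | ⟨q1, hq1, h⟩
    · rw [List.mem_singleton] at h
      subst h
      exact Relation.ReflTransGen.refl
    · rw [List.mem_singleton] at hq1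
      subst hq1
      exact h
  · intro hr
    induction hr with
    | refl => exact mono s (List.mem_singleton.mpr rfl)
    | @tail b c hb hbc ih => exact closed b ih c hbc.1 hbc.2

-- ===== scoring helpers shared by both reductions =====
def pvGScore (comp : List Int) : Int :=
  if ((comp.length : Int)) < 2 then 0
  else if 8 ≤ ((comp.length : Int)) then 23
  else PySem.Dict.getD pvHawkTable ((comp.length : Int)) 0
def pvBInc (size : Int) : Int :=
  if 8 ≤ size then 23
  else if 2 ≤ size then (PySem.List.pyGet? ([0, 0, 5, 9, 12, 16, 20, 24] : List Int) size).getD 0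
  else 0

theorem pvGScore_sorted (c : List Int) :
    pvGScore (PySem.List.sorted c (fun x => x)) = pvBInc ((c.length : Int)) := by
  unfold pvGScore pvBInc
  rw [PySem.List.length_sorted]
  rcases lt_or_ge c.length 2 with h | h
  · have h' : ((c.length : Int)) < 2 := by exact_mod_cast h
    rw [if_pos h', if_neg (by omega), if_neg (by omega)]
  · rcases le_or_gt 8 c.length with h8 | h8
    · have h' : (8 : Int) ≤ (c.length : Int) := by exact_mod_cast h8
      rw [if_neg (by omega), if_pos h', if_pos h']
    · have h2 : (2 : Int) ≤ (c.length : Int) := by exact_mod_cast h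
      have h8' : ((c.length : Int)) < 8 := by exact_mod_cast h8
      rw [if_neg (by omega), if_neg (by omega), if_neg (by omega), if_pos h2]
      interval_cases h : c.length <;> rfl

theorem pvFoldA_eq (l : List (List Int)) (a : Int) :
    l.foldl
      (fun score comp =>
        let size : Int := (comp.length : Int)
        if size < 2 then score
        else if 8 ≤ size then score + 23
        else score + PySem.Dict.getD pvHawkTable size 0) a
    = a + (l.map pvGScore).sum := by
  induction l generalizing a with
  | nil => simp
  | cons c t ih =>
    simp only [List.foldl_cons, List.map_cons, List.sum_cons, ih]
    unfold pvGScore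
    split_ifs <;> ring

theorem pvA_components_append (adjGet : Int → List Int) (iF : Nat) :
    ∀ (fuel : Nat) (remaining : PySem.Set Int) (comps : List (List Int)),
      pvA_components adjGet iF fuel remaining comps
        = comps ++ pvA_components adjGet iF fuel remaining [] := by
  intro fuel
  induction fuel with
  | zero => intro remaining comps; simp [pvA_components]
  | succ f ih =>
    intro remaining comps
    cases remaining with
    | nil => simp [pvA_components]
    | cons start tl =>
      simp only [pvA_components]
      rw [ih _ (comps ++ _), ih _ ([] ++ _)]
      simp

-- ===== B-side: labels are a 'shaped' list over a label function g =====
def pvShaped (animals : List String) (g : Int → Int) : List (Option Int) :=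
  (PySem.List.enumerate animals).map (fun p => if p.2 == "hawk" then some (g p.1) else none)

theorem pvHawks_bounds (animals : List String) (u : Int) (hu : u ∈ pvHawks animals) :
    0 ≤ u ∧ u < (animals.length : Int) := by
  obtain ⟨k, hk, rfl, _⟩ := (pvHawks_mem animals u).mp hu
  exact ⟨Int.natCast_nonneg k, by exact_mod_cast hk⟩

theorem pvHawks_natCast (animals : List String) (k : Nat) (hk : k < animals.length) :
    ((k : Int) ∈ pvHawks animals) ↔ animals[k] = "hawk" := by
  rw [pvHawks_mem]
  constructor
  · rintro ⟨k', hk', heq, hh⟩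
    have : k = k' := by exact_mod_cast heq
    subst this
    exact hh
  · intro hh
    exact ⟨k, hk, rfl, hh⟩

-- reading the shaped label list at an in-range index
theorem pvShaped_get (animals : List String) (g : Int → Int) (u : Int)
    (h0 : 0 ≤ u) (hlt : u < (animals.length : Int)) :
    (PySem.List.pyGet? (pvShaped animals g) u).getD none
    = if u ∈ pvHawks animals then some (g u) else none := by
  obtain ⟨k, rfl⟩ := Int.eq_ofNat_of_zero_le h0
  have hk : k < animals.length := by exact_mod_cast hlt
  rw [PySem.List.pyGet?_natCast]
  unfold pvShaped
  have hke : k < (PySem.List.enumerate animals).length := by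
    rw [PySem.List.length_enumerate]
    exact hk
  rw [List.getElem?_map, List.getElem?_eq_getElem hke, PySem.List.getElem_enumerate]
  simp only [Option.map_some, Option.getD_some, zero_add]
  by_cases hh : animals[k] = "hawk"
  · rw [if_pos (by simpa using hh), if_pos ((pvHawks_natCast animals k hk).mpr hh)]
  · rw [if_neg (by simpa using hh),
      if_neg (fun hmem => hh ((pvHawks_natCast animals k hk).mp hmem))]

-- relabelling a shaped list is shaped over the merged label function
theorem pvShaped_relabel (animals : List String) (g : Int → Int) (lv lu : Int) :
    (pvShaped animals g).map (fun x => if x == some lv then some lu else x)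
    = pvShaped animals (fun i => if g i = lv then lu else g i) := by
  unfold pvShaped
  rw [List.map_map]
  apply List.map_congr_left
  intro p _
  by_cases hp : (p.2 == "hawk") = true
  · simp only [hp, if_true, Function.comp]
    by_cases hg : g p.1 = lv
    · simp [hg]
    · simp [hg]
  · simp only [hp, Bool.false_eq_true, if_false, Function.comp]
    simp

-- the inner edge loop of pvB_labels, for one hawk u
theorem pvInner (animals : List String) (adjacency : List (Int × List Int))
    (hpre : Pre_score_hawks animals adjacency) (u : Int) (hu : u ∈ pvHawks animals) :
    ∀ (ns : List Int) (g : Int → Int), (∀ v ∈ ns, v ∈ pvAdj adjacency u) →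
      (∀ i ∈ pvHawks animals, pvConn animals adjacency i (g i)) →
      ∃ g' : Int → Int,
        (ns.foldl
          (fun lbl v =>
            if decide (0 ≤ v) && decide (v < (animals.length : Int)) &&
                ((PySem.List.pyGet? lbl v).getD none).isSome &&
                (((PySem.List.pyGet? lbl v).getD none) != ((PySem.List.pyGet? lbl u).getD none)) then
              lbl.map (fun x => if x == (PySem.List.pyGet? lbl v).getD none
                                then (PySem.List.pyGet? lbl u).getD none else x)
            else lbl) (pvShaped animals g)) = pvShaped animals g'
        ∧ (∀ i ∈ pvHawks animals, pvConn animals adjacency i (g' i))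
        ∧ (∀ x y, g x = g y → g' x = g' y)
        ∧ (∀ v ∈ ns, v ∈ pvHawks animals → g' u = g' v) := by
  intro ns
  induction ns with
  | nil =>
    intro g _ hgood
    exact ⟨g, rfl, hgood, fun _ _ h => h, by simp⟩
  | cons v t ih =>
    intro g hns hgood
    obtain ⟨hu0, hun⟩ := pvHawks_bounds animals u hu
    have getu : (PySem.List.pyGet? (pvShaped animals g) u).getD none = some (g u) := by
      rw [pvShaped_get animals g u hu0 hun, if_pos hu]
    simp only [List.foldl_cons]
    by_cases hvb : 0 ≤ v ∧ v < (animals.length : Int)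
    · have getv := pvShaped_get animals g v hvb.1 hvb.2
      by_cases hvH : v ∈ pvHawks animals
      · rw [if_pos hvH] at getv
        by_cases hgv : g v = g u
        · -- labels already equal: no relabel
          have hcond : (decide (0 ≤ v) && decide (v < (animals.length : Int)) &&
              ((PySem.List.pyGet? (pvShaped animals g) v).getD none).isSome &&
              (((PySem.List.pyGet? (pvShaped animals g) v).getD none)
                != ((PySem.List.pyGet? (pvShaped animals g) u).getD none))) = false := by
            rw [getu, getv, hgv]
            simp
          rw [hcond]
          simp only [Bool.false_eq_true, if_false]
          obtain ⟨g', heq, hg1, hg2, hg3⟩ := ih g (fun w hw => hns w (List.mem_cons_of_mem _ hw)) hgood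
          refine ⟨g', heq, hg1, hg2, ?_⟩
          intro w hw hwH
          rcases List.mem_cons.mp hw with rfl | hw'
          · exact hg2 u w hgv.symm
          · exact hg3 w hw' hwH
        · -- merge the two labels
          have hcond : (decide (0 ≤ v) && decide (v < (animals.length : Int)) &&
              ((PySem.List.pyGet? (pvShaped animals g) v).getD none).isSome &&
              (((PySem.List.pyGet? (pvShaped animals g) v).getD none)
                != ((PySem.List.pyGet? (pvShaped animals g) u).getD none))) = true := by
            rw [getu, getv]
            simp [hvb.1, hvb.2, hgv]
          rw [hcond]
          simp only [if_true]
          rw [getu, getv, pvShaped_relabel]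
          set g1 : Int → Int := fun i => if g i = g v then g u else g i with hg1def
          have hvadj : v ∈ pvAdj adjacency u := hns v List.mem_cons_self
          have hEduv : pvEd animals adjacency u v := ⟨hu, hvH, hvadj⟩
          have hConnvu : pvConn animals adjacency v u :=
            Relation.ReflTransGen.single (pvEd_symm animals adjacency hpre u v hEduv)
          have hgood1 : ∀ i ∈ pvHawks animals, pvConn animals adjacency i (g1 i) := by
            intro i hi
            rw [hg1def]
            dsimp only
            by_cases hgi : g i = g v
            · rw [if_pos hgi]
              have h1 : pvConn animals adjacency i (g v) := hgi ▸ hgood i hi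
              have h2 : pvConn animals adjacency (g v) v :=
                pvConn_symm animals adjacency hpre v (g v) (hgood v hvH)
              exact ((h1.trans h2).trans hConnvu).trans (hgood u hu)
            · rw [if_neg hgi]
              exact hgood i hi
          obtain ⟨g', heq, hp1, hp2, hp3⟩ := ih g1
            (fun w hw => hns w (List.mem_cons_of_mem _ hw)) hgood1
          have hpres : ∀ x y, g x = g y → g1 x = g1 y := by
            intro x y hxy
            rw [hg1def]
            dsimp only
            rw [hxy]
          refine ⟨g', heq, hp1, fun x y hxy => hp2 x y (hpres x y hxy), ?_⟩
          intro w hw hwH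
          rcases List.mem_cons.mp hw with rfl | hw'
          · -- g1 u = g1 w for w = v
            apply hp2
            rw [hg1def]
            dsimp only
            rw [if_neg (fun h => hgv h.symm), if_pos rfl]
          · exact hp3 w hw' hwH
      · -- v is not a hawk: its label slot is none
        rw [if_neg hvH] at getv
        have hcond : (decide (0 ≤ v) && decide (v < (animals.length : Int)) &&
            ((PySem.List.pyGet? (pvShaped animals g) v).getD none).isSome &&
            (((PySem.List.pyGet? (pvShaped animals g) v).getD none)
              != ((PySem.List.pyGet? (pvShaped animals g) u).getD none))) = false := by
          rw [getv]
          simp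
        rw [hcond]
        simp only [Bool.false_eq_true, if_false]
        obtain ⟨g', heq, hg1, hg2, hg3⟩ := ih g (fun w hw => hns w (List.mem_cons_of_mem _ hw)) hgood
        refine ⟨g', heq, hg1, hg2, ?_⟩
        intro w hw hwH
        rcases List.mem_cons.mp hw with rfl | hw'
        · exact absurd hwH hvH
        · exact hg3 w hw' hwH
    · -- v out of board range: condition is false and v cannot be a hawk
      have hcond : (decide (0 ≤ v) && decide (v < (animals.length : Int)) &&
          ((PySem.List.pyGet? (pvShaped animals g) v).getD none).isSome &&
          (((PySem.List.pyGet? (pvShaped animals g) v).getD none)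
            != ((PySem.List.pyGet? (pvShaped animals g) u).getD none))) = false := by
        rcases not_and_or.mp hvb with h | h
        · simp [h]
        · simp [h]
      rw [hcond]
      simp only [Bool.false_eq_true, if_false]
      obtain ⟨g', heq, hg1, hg2, hg3⟩ := ih g (fun w hw => hns w (List.mem_cons_of_mem _ hw)) hgood
      refine ⟨g', heq, hg1, hg2, ?_⟩
      intro w hw hwH
      rcases List.mem_cons.mp hw with rfl | hw'
      · exact absurd (pvHawks_bounds animals w hwH) hvb
      · exact hg3 w hw' hwH

-- the outer loop of pvB_labels
theorem pvOuter (animals : List String) (adjacency : List (Int × List Int))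
    (hpre : Pre_score_hawks animals adjacency) :
    ∀ (us : List Int) (g : Int → Int), (∀ u ∈ us, 0 ≤ u ∧ u < (animals.length : Int)) →
      (∀ i ∈ pvHawks animals, pvConn animals adjacency i (g i)) →
      ∃ g' : Int → Int,
        (us.foldl
          (fun lbl u =>
            if ((PySem.List.pyGet? lbl u).getD none) = none then lbl
            else
              (PySem.Dict.getD (PySem.Dict.ofList adjacency) u []).foldl
                (fun lbl v =>
                  if decide (0 ≤ v) && decide (v < (animals.length : Int)) &&
                      ((PySem.List.pyGet? lbl v).getD none).isSome &&
                      (((PySem.List.pyGet? lbl v).getD none) != ((PySem.List.pyGet? lbl u).getD none)) then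
                    lbl.map (fun x => if x == (PySem.List.pyGet? lbl v).getD none
                                      then (PySem.List.pyGet? lbl u).getD none else x)
                  else lbl) lbl) (pvShaped animals g)) = pvShaped animals g'
        ∧ (∀ i ∈ pvHawks animals, pvConn animals adjacency i (g' i))
        ∧ (∀ x y, g x = g y → g' x = g' y)
        ∧ (∀ u ∈ us, u ∈ pvHawks animals →
            ∀ v ∈ pvAdj adjacency u, v ∈ pvHawks animals → g' u = g' v) := by
  intro us
  induction us with
  | nil =>
    intro g _ hgood
    exact ⟨g, rfl, hgood, fun _ _ h => h, by simp⟩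
  | cons u us' ih =>
    intro g hb hgood
    obtain ⟨hu0, hun⟩ := hb u List.mem_cons_self
    have getu := pvShaped_get animals g u hu0 hun
    simp only [List.foldl_cons]
    by_cases huH : u ∈ pvHawks animals
    · rw [if_pos huH] at getu
      rw [if_neg (by rw [getu]; simp)]
      obtain ⟨g1, heq1, hgood1, hpres1, hedge1⟩ := pvInner animals adjacency hpre u huH
        (PySem.Dict.getD (PySem.Dict.ofList adjacency) u []) g (fun v hv => hv) hgood
      rw [heq1]
      obtain ⟨g', heq, hg1, hg2, hg3⟩ := ih g1 (fun w hw => hb w (List.mem_cons_of_mem _ hw)) hgood1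
      refine ⟨g', heq, hg1, fun x y hxy => hg2 x y (hpres1 x y hxy), ?_⟩
      intro w hw hwH v hv hvH
      rcases List.mem_cons.mp hw with rfl | hw'
      · exact hg2 w v (hedge1 v hv hvH)
      · exact hg3 w hw' hwH v hv hvH
    · rw [if_neg huH] at getu
      rw [if_pos (by rw [getu])]
      obtain ⟨g', heq, hg1, hg2, hg3⟩ := ih g (fun w hw => hb w (List.mem_cons_of_mem _ hw)) hgood
      refine ⟨g', heq, hg1, hg2, ?_⟩
      intro w hw hwH v hv hvH
      rcases List.mem_cons.mp hw with rfl | hw'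
      · exact absurd hwH huH
      · exact hg3 w hw' hwH v hv hvH

theorem pvLabels_spec (animals : List String) (adjacency : List (Int × List Int))
    (hpre : Pre_score_hawks animals adjacency) :
    ∃ g : Int → Int, pvB_labels animals adjacency = pvShaped animals g
      ∧ (∀ i ∈ pvHawks animals, pvConn animals adjacency i (g i))
      ∧ (∀ u ∈ pvHawks animals, ∀ v ∈ pvAdj adjacency u, v ∈ pvHawks animals → g u = g v) := by
  have hinit : ((PySem.List.enumerate animals).map
      (fun p => if p.2 == "hawk" then some p.1 else none)) = pvShaped animals (fun i => i) := rfl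
  have hb : ∀ u ∈ PySem.List.pyRange 0 (animals.length : Int) 1,
      0 ≤ u ∧ u < (animals.length : Int) := by
    intro u hu
    rw [PySem.List.mem_pyRange_one] at hu
    exact hu
  obtain ⟨g', heq, hg1, hg2, hg3⟩ := pvOuter animals adjacency hpre
    (PySem.List.pyRange 0 (animals.length : Int) 1) (fun i => i) hb
    (fun i _ => Relation.ReflTransGen.refl)
  refine ⟨g', ?_, hg1, ?_⟩
  · unfold pvB_labels
    rw [hinit]
    exact heq
  · intro u huH v hv hvH
    have humem : u ∈ PySem.List.pyRange 0 (animals.length : Int) 1 := by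
      rw [PySem.List.mem_pyRange_one]
      exact pvHawks_bounds animals u huH
    exact hg3 u humem huH v hv hvH

-- the label function separates exactly the connected components
theorem pvLab_iff (animals : List String) (adjacency : List (Int × List Int))
    (hpre : Pre_score_hawks animals adjacency) (g : Int → Int)
    (h1 : ∀ i ∈ pvHawks animals, pvConn animals adjacency i (g i))
    (h2 : ∀ u ∈ pvHawks animals, ∀ v ∈ pvAdj adjacency u, v ∈ pvHawks animals → g u = g v)
    (x : Int) (hx : x ∈ pvHawks animals) (y : Int) (hy : y ∈ pvHawks animals) :
    g x = g y ↔ pvConn animals adjacency x y := by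
  constructor
  · intro hgl
    have hx1 := h1 x hx
    have hy1 := pvConn_symm animals adjacency hpre y (g y) (h1 y hy)
    exact (hgl ▸ hx1).trans hy1
  · intro hconn
    revert hy
    induction hconn with
    | refl => intro _; rfl
    | @tail b c hxb hbc ih =>
      intro _
      exact (ih hbc.1).trans (h2 b hbc.1 c hbc.2.2 hbc.2.1)

theorem pvFoldSkipNone (l : List (Option Int)) (d : PySem.Dict Int Int) :
    l.foldl (fun d x => match x with | none => d | some k => d.insert k (d.getD k 0 + 1)) d
    = (l.filterMap id).foldl (fun d k => d.insert k (d.getD k 0 + 1)) d := by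
  induction l generalizing d with
  | nil => rfl
  | cons x t ih => cases x <;> simp [ih]

theorem pvShaped_filterMap (animals : List String) (g : Int → Int) :
    (pvShaped animals g).filterMap id = (pvHawks animals).map g := by
  unfold pvShaped pvHawks
  rw [List.filterMap_map]
  suffices h : ∀ (xs : List String) (s : Int),
      (PySem.List.enumerate xs s).filterMap
          (fun p => if p.2 == "hawk" then some (g p.1) else none)
      = (((PySem.List.enumerate xs s).filter (fun p => p.2 == "hawk")).map (fun p => p.1)).map g by
    exact h animals 0
  intro xs
  induction xs with
  | nil => intro s; simp [PySem.List.enumerate_nil]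
  | cons a t ih =>
    intro s
    rw [PySem.List.enumerate_cons, List.filterMap_cons, List.filter_cons]
    by_cases ha : a = "hawk"
    · simp only [ha, beq_self_eq_true, if_true]
      rw [ih (s + 1)]
      simp [List.map_map]
    · have hb : (a == "hawk") = false := beq_eq_false_iff_ne.mpr ha
      simp only [hb, Bool.false_eq_true, if_false]
      rw [ih (s + 1)]

-- B's program value as the label-count sum
theorem pvB_value (animals : List String) (adjacency : List (Int × List Int)) (g : Int → Int)
    (hshape : pvB_labels animals adjacency = pvShaped animals g) :
    score_hawks_alt animals adjacency
      = ((PySem.Set.ofList ((pvHawks animals).map g)).map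
          (fun k => pvBInc ((((pvHawks animals).map g).count k : Int)))).sum := by
  unfold score_hawks_alt
  rw [hshape]
  dsimp only
  rw [pvFoldSkipNone, PySem.Dict.foldl_insert_getD_add_one_eq_counter, pvShaped_filterMap]
  set L := (pvHawks animals).map g with hL
  have hvals : PySem.Dict.values (PySem.Dict.counter L)
      = (PySem.Set.ofList L).map (fun k => (L.count k : Int)) := by
    simp only [PySem.Dict.values, PySem.Dict.items_counter, List.map_map]
    rfl
  rw [hvals, PySem.List.foldl_add (g := fun s => if 8 ≤ s then (23 : Int)
      else if 2 ≤ s then (PySem.List.pyGet? ([0, 0, 5, 9, 12, 16, 20, 24] : List Int) s).getD 0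
      else 0), List.map_map]
  simp only [pvBInc, zero_add]
  rfl

-- splitting the label-count sum at one label
theorem pvSum_split (L : List Int) (d : Int) (hd : d ∈ L) :
    ((PySem.Set.ofList L).map (fun k => pvBInc ((L.count k : Int)))).sum
    = pvBInc ((L.count d : Int))
      + ((PySem.Set.ofList (L.filter (fun x => !(x == d)))).map
          (fun k => pvBInc (((L.filter (fun x => !(x == d))).count k : Int)))).sum := by
  set L' := L.filter (fun x => !(x == d)) with hL'
  have hdL' : d ∉ L' := by simp [hL', List.mem_filter]
  have hnd1 : (PySem.Set.ofList L).Nodup := PySem.Set.nodup_ofList L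
  have hnd2 : (d :: PySem.Set.ofList L').Nodup := by
    refine List.nodup_cons.mpr ⟨?_, PySem.Set.nodup_ofList L'⟩
    rw [PySem.Set.mem_ofList]; exact hdL'
  have hperm : (PySem.Set.ofList L).Perm (d :: PySem.Set.ofList L') := by
    rw [List.perm_ext_iff_of_nodup hnd1 hnd2]
    intro a
    simp only [PySem.Set.mem_ofList, List.mem_cons, hL', List.mem_filter, Bool.not_eq_true',
      beq_eq_false_iff_ne, ne_eq]
    constructor
    · intro haL
      by_cases had : a = d
      · exact Or.inl had
      · exact Or.inr ⟨haL, had⟩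
    · rintro (rfl | ⟨haL, _⟩) <;> [exact hd; exact haL]
  have hsum := (hperm.map (fun k => pvBInc ((L.count k : Int)))).sum_eq
  rw [hsum, List.map_cons, List.sum_cons]
  congr 1
  apply congrArg
  apply List.map_congr_left
  intro k hk
  rw [PySem.Set.mem_ofList] at hk
  have hkd : (!(k == d)) = true := by
    simp only [hL', List.mem_filter] at hk; exact hk.2
  rw [← List.count_filter (p := fun x => !(x == d)) hkd]

theorem pvNodupSubsetLen (l l' : List Int) (h : l.Nodup) (hs : ∀ x ∈ l, x ∈ l') :
    l.length ≤ l'.length := by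
  calc l.length = l.toFinset.card := (List.toFinset_card_of_nodup h).symm
    _ ≤ l'.toFinset.card := Finset.card_le_card (fun x hx => by
        rw [List.mem_toFinset] at *
        exact hs x hx)
    _ ≤ l'.length := l'.toFinset_card_le

theorem pvCountMap (g : Int → Int) (R : List Int) (b : Int) :
    ((R.map g).count b) = (R.filter (fun x => g x == b)).length := by
  rw [List.count, List.countP_map, List.countP_eq_length_filter]
  rfl

-- the peel induction: A's component scores sum to the label-count sum
theorem pvPeel (animals : List String) (adjacency : List (Int × List Int))
    (hpre : Pre_score_hawks animals adjacency) (g : Int → Int)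
    (h1 : ∀ i ∈ pvHawks animals, pvConn animals adjacency i (g i))
    (h2 : ∀ u ∈ pvHawks animals, ∀ v ∈ pvAdj adjacency u, v ∈ pvHawks animals → g u = g v) :
    ∀ (fuel : Nat) (R : List Int), R.Nodup → (∀ x ∈ R, x ∈ pvHawks animals) →
      pvClosed animals adjacency R → R.length < fuel →
      ((pvA_components (pvAdj adjacency) (animals.length + 1) fuel R []).map pvGScore).sum
      = ((PySem.Set.ofList (R.map g)).map (fun k => pvBInc (((R.map g).count k : Int)))).sum := by
  intro fuel
  induction fuel with
  | zero => intro R _ _ _ h; omega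
  | succ f ih =>
    intro R hnd hRH hcl hlen
    cases R with
    | nil => simp [pvA_components]
    | cons s tl =>
      have hsR : s ∈ s :: tl := List.mem_cons_self
      have hlenR : (s :: tl).length < animals.length + 1 := by
        have := pvNodupSubsetLen (s :: tl) (pvHawks animals) hnd hRH
        have := pvHawks_len_le animals
        omega
      obtain ⟨hVnd, hVmem⟩ := pvBfs_char (pvAdj adjacency) (s :: tl) hnd s hsR
        (animals.length + 1) hlenR
      set V := pvA_bfs (pvAdj adjacency) (s :: tl) (animals.length + 1) [s]
        (PySem.Set.ofList [s]) with hVdef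
      have hiff : ∀ x, x ∈ V ↔ (pvConn animals adjacency s x ∧ x ∈ s :: tl) := by
        intro x
        rw [hVmem x, pvReach_iff animals adjacency (s :: tl) hRH hcl s hsR x]
      have hglab : ∀ x, x ∈ V ↔ (x ∈ s :: tl ∧ g x = g s) := by
        intro x
        rw [hiff]
        constructor
        · rintro ⟨hc, hxR⟩
          exact ⟨hxR, (pvLab_iff animals adjacency hpre g h1 h2 x (hRH x hxR) s
            (hRH s hsR)).mpr (pvConn_symm animals adjacency hpre s x hc)⟩
        · rintro ⟨hxR, hg⟩
          exact ⟨pvConn_symm animals adjacency hpre x s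
            ((pvLab_iff animals adjacency hpre g h1 h2 x (hRH x hxR) s
              (hRH s hsR)).mp hg), hxR⟩
      have hsV : s ∈ V := (hglab s).mpr ⟨hsR, rfl⟩
      -- one step of the components loop
      simp only [pvA_components]
      rw [pvA_components_append, List.map_append, List.sum_append, List.nil_append,
        List.map_cons, List.map_nil, List.sum_cons, List.sum_nil, add_zero]
      -- the new remaining set as a filter over labels
      have hR'filter : PySem.Set.diff (s :: tl) V
          = (s :: tl).filter (fun x => !(g x == g s)) := by
        show (s :: tl).filter (fun a => !(PySem.Set.contains V a))
          = (s :: tl).filter (fun x => !(g x == g s))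
        apply List.filter_congr
        intro x hx
        apply Bool.eq_iff_iff.mpr
        simp only [Bool.not_eq_true', PySem.Set.contains_eq_listContains,
          List.contains_eq_mem, decide_eq_false_iff_not, beq_eq_false_iff_ne, ne_eq]
        rw [hglab x]
        constructor
        · intro h hgx
          exact h ⟨hx, hgx⟩
        · rintro h ⟨_, hgx⟩
          exact h hgx
      have hnd' : (PySem.Set.diff (s :: tl) V).Nodup := by
        rw [hR'filter]
        exact hnd.filter _
      have hRH' : ∀ x ∈ PySem.Set.diff (s :: tl) V, x ∈ pvHawks animals := by
        intro x hx
        rw [hR'filter, List.mem_filter] at hx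
        exact hRH x hx.1
      have hcl' : pvClosed animals adjacency (PySem.Set.diff (s :: tl) V) := by
        intro x hx y hyH hconn
        rw [hR'filter, List.mem_filter] at hx
        obtain ⟨hxR, hxg⟩ := hx
        rw [hR'filter, List.mem_filter]
        refine ⟨hcl x hxR y hyH hconn, ?_⟩
        simp only [Bool.not_eq_true', beq_eq_false_iff_ne, ne_eq] at hxg ⊢
        intro hgy
        apply hxg
        have := (pvLab_iff animals adjacency hpre g h1 h2 x (hRH x hxR) y hyH).mpr hconn
        omega
      have hlen' : (PySem.Set.diff (s :: tl) V).length < f := by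
        have hsub : (PySem.Set.diff (s :: tl) V).length ≤ tl.length := by
          rw [hR'filter]
          have hcs : (g s == g s) = true := beq_self_eq_true _
          simp only [List.filter_cons, hcs, Bool.not_true, Bool.false_eq_true, if_false]
          exact List.length_filter_le _ _
        have : (s :: tl).length = tl.length + 1 := rfl
        omega
      rw [ih (PySem.Set.diff (s :: tl) V) hnd' hRH' hcl' hlen']
      rw [pvGScore_sorted]
      -- split the label sum at g s
      rw [pvSum_split ((s :: tl).map g) (g s) (List.mem_map.mpr ⟨s, hsR, rfl⟩)]
      -- sizes agree
      have hVlen : ((V.length : Nat) : Int) = ((((s :: tl).map g).count (g s) : Nat) : Int) := by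
        have hperm : V.Perm ((s :: tl).filter (fun x => g x == g s)) := by
          rw [List.perm_ext_iff_of_nodup hVnd (hnd.filter _)]
          intro a
          rw [hglab a, List.mem_filter]
          simp [beq_iff_eq]
        rw [pvCountMap g (s :: tl) (g s), hperm.length_eq]
      rw [hVlen]
      congr 1
      -- tail sums agree up to relabelling of the filtered list
      have hmapfilter : ((s :: tl).map g).filter (fun x => !(x == g s))
          = (PySem.Set.diff (s :: tl) V).map g := by
        rw [hR'filter, List.filter_map]
        rfl
      rw [hmapfilter]

-- ===== VERDICT (by name: the statement is the Claim_ definition above) =====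
theorem score_hawks_spec : Claim_equal_score_hawks := by
  unfold Claim_equal_score_hawks
  intro animals adjacency hdom hpre
  unfold Spec_score_hawks
  obtain ⟨g, hshape, h1, h2⟩ := pvLabels_spec animals adjacency hpre
  rw [pvB_value animals adjacency g hshape]
  unfold score_hawks
  dsimp only
  by_cases hE : (((PySem.List.enumerate animals).filter (fun p => p.2 == "hawk")).map
      (fun p => p.1)).isEmpty
  · rw [if_pos hE]
    have hnil : pvHawks animals = [] := by
      rw [List.isEmpty_iff] at hE
      exact hE
    rw [hnil]
    simp [PySem.Set.ofList]
  · rw [if_neg hE]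
    have hofl : PySem.Set.ofList (((PySem.List.enumerate animals).filter
        (fun p => p.2 == "hawk")).map (fun p => p.1)) = pvHawks animals :=
      PySem.Set.ofList_eq_self_of_nodup _ (pvHawks_nodup animals)
    rw [hofl, pvFoldA_eq]
    have := pvPeel animals adjacency hpre g h1 h2 (animals.length + 1) (pvHawks animals)
      (pvHawks_nodup animals) (fun x hx => hx)
      (fun x hx y hy hconn => hy)
      (by have := pvHawks_len_le animals; omega)
    rw [show pvAdj adjacency = fun node => PySem.Dict.getD (PySem.Dict.ofList adjacency) node []
      from rfl] at this
    rw [this]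
    simp
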